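-- pv_equiv track=rewrite | github.com/ComputerArchitectureUFV/fdam | hw/afu_manager_generator/make_select.py | make_select_tree_array
-- ===== SOURCE A (Python) =====
-- def make_select_tree_array(num_input, array):
--     m_array = []
--     while num_input > 8:
--         m_array.append(8)
--         num_input = num_input - 8
--     else:
--         m_array.append(num_input)
--
--     array.append(m_array)
--     if len(m_array) == 1:
--         return array
--     else:
--         return make_select_tree_array(len(m_array), array)
-- ===== SOURCE B (Python) =====
-- def make_select_tree_array(num_input, array):
--     chunks = []
--     n = num_input
--     while True:
--         if n > 8:
--             count = (n - 1) // 8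
--             m = [8] * count + [n - 8 * count]
--         else:
--             m = [n]
--         chunks.append(m)
--         if len(m) == 1:
--             break
--         n = len(m)
--     array.extend(chunks)
--     return array
-- ===== Notes on version B (the rewrite author's own statement) =====
-- stated objective: simpler
-- what changed: Replaces A's subtract-8 while loop with a closed-form ([8]*((n-1)//8) + [remainder]) per level and A's tail recursion with an explicit loop that collects the levels and extends the array once.
import Mathlib
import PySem

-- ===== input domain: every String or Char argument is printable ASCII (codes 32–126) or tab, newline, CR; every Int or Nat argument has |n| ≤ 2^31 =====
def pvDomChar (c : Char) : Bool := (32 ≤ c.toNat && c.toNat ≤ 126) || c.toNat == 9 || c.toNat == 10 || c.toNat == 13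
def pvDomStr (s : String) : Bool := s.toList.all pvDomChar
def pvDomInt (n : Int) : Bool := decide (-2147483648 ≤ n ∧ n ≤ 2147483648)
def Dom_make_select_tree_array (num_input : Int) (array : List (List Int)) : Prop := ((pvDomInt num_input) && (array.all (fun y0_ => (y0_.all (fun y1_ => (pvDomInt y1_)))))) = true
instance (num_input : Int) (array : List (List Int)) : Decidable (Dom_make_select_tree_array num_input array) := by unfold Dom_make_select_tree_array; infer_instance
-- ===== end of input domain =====

-- B builds each level's fan-out list in closed form via (n-1)//8 (instead of A's
-- subtract-8 loop) and collects the levels in a separate list appended to `array`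
-- once, with an explicit loop instead of A's tail recursion (objective: simpler).
-- Both A and B mutate `array` in place identically (appending the same levels);
-- the equivalence proved here is about the return value.

-- ===== PORT A =====
-- the inner `while num_input > 8` loop of A, building m_array element by element
def pvBuildM (n : Int) : List Int :=
  if n > 8 then 8 :: pvBuildM (n - 8) else [n]
termination_by n.toNat
decreasing_by omega

theorem pvBuildM_len_lt (n : Int) (h2 : 2 ≤ n) : ((pvBuildM n).length : Int) < n := by
  rw [pvBuildM]
  split
  · rename_i h8
    by_cases h16 : n - 8 ≤ 8
    · rw [pvBuildM]
      have : ¬ (n - 8 > 8) := by omega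
      simp [this]
      omega
    · have := pvBuildM_len_lt (n - 8) (by omega)
      simp only [List.length_cons]
      push_cast
      omega
  · simp; omega
termination_by n.toNat
decreasing_by omega

theorem pvBuildM_len_pos (n : Int) : 1 ≤ (pvBuildM n).length := by
  rw [pvBuildM]; split <;> simp

theorem pvBuildM_len_one (n : Int) (h : ¬ n > 8) : (pvBuildM n).length = 1 := by
  rw [pvBuildM]; simp [h]

def make_select_tree_array (num_input : Int) (array : List (List Int)) : List (List Int) :=
  if (pvBuildM num_input).length = 1 then array ++ [pvBuildM num_input]
  else make_select_tree_array ((pvBuildM num_input).length : Int)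
         (array ++ [pvBuildM num_input])
termination_by num_input.toNat
decreasing_by
  rename_i h
  have hlen := pvBuildM_len_pos num_input
  have h8 : num_input > 8 := by
    by_contra hc
    exact h (pvBuildM_len_one num_input hc)
  have := pvBuildM_len_lt num_input (by omega)
  omega

-- ===== PORT B =====
-- one level's fan-out list, built in closed form
def pvChunk (n : Int) : List Int :=
  if n > 8 then
    List.replicate (PySem.Int.floordiv (n - 1) 8).toNat 8
      ++ [n - 8 * PySem.Int.floordiv (n - 1) 8]
  else [n]

theorem pvChunk_len_lt (n : Int) (h2 : 2 ≤ n) : ((pvChunk n).length : Int) < n := by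
  unfold pvChunk
  split
  · rename_i h8
    have hd := PySem.Int.floordiv_eq_ediv_of_pos (a := n - 1) (b := 8) (by omega)
    simp only [List.length_append, List.length_replicate, List.length_cons,
      List.length_nil, hd]
    omega
  · simp; omega

theorem pvChunk_len_pos (n : Int) : 1 ≤ (pvChunk n).length := by
  unfold pvChunk; split <;> simp

theorem pvChunk_len_one (n : Int) (h : ¬ n > 8) : (pvChunk n).length = 1 := by
  unfold pvChunk; simp [h]

-- B's `while True` loop: collect the levels into a list (front to back)
def pvChunks (n : Int) : List (List Int) :=
  if (pvChunk n).length = 1 then [pvChunk n]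
  else pvChunk n :: pvChunks ((pvChunk n).length : Int)
termination_by n.toNat
decreasing_by
  rename_i h
  have hlen := pvChunk_len_pos n
  have h8 : n > 8 := by
    by_contra hc
    exact h (pvChunk_len_one n hc)
  have := pvChunk_len_lt n (by omega)
  omega

def make_select_tree_array_alt (num_input : Int) (array : List (List Int)) : List (List Int) :=
  array ++ pvChunks num_input

-- ===== PRECONDITION & SPEC =====
def Spec_make_select_tree_array (num_input : Int) (array : List (List Int)) (out : List (List Int)) : Prop := out = make_select_tree_array_alt num_input array
instance (num_input : Int) (array : List (List Int)) (out : List (List Int)) : Decidable (Spec_make_select_tree_array num_input array out) := by unfold Spec_make_select_tree_array; infer_instance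

-- ===== CLAIM (what is proved, stated in full; the proofs are below) =====
def Claim_equal_make_select_tree_array : Prop := ∀ (num_input : Int) (array : List (List Int)), Dom_make_select_tree_array num_input array → Spec_make_select_tree_array num_input array (make_select_tree_array num_input array)

-- ===== LEMMAS AND PROOFS =====

-- the subtract-8 loop and the closed form build the same list
theorem pvBuildM_eq_chunk (n : Int) : pvBuildM n = pvChunk n := by
  rw [pvBuildM]
  unfold pvChunk
  split
  · rename_i h8
    by_cases h16 : n - 8 ≤ 8
    · have hd : PySem.Int.floordiv (n - 1) 8 = 1 := by
        rw [PySem.Int.floordiv_eq_ediv_of_pos (by omega)]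
        omega
      rw [pvBuildM, hd]
      have hn8 : ¬ (n - 8 > 8) := by omega
      rw [if_neg hn8]
      norm_num
    · have ih := pvBuildM_eq_chunk (n - 8)
      rw [ih]
      unfold pvChunk
      have h8' : n - 8 > 8 := by omega
      have hd : PySem.Int.floordiv (n - 8 - 1) 8 = PySem.Int.floordiv (n - 1) 8 - 1 := by
        rw [PySem.Int.floordiv_eq_ediv_of_pos (by omega),
            PySem.Int.floordiv_eq_ediv_of_pos (by omega)]
        omega
      have hc1 : 1 ≤ PySem.Int.floordiv (n - 1) 8 := by
        rw [PySem.Int.floordiv_eq_ediv_of_pos (by omega)]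
        omega
      rw [if_pos h8', hd]
      have hrep : (PySem.Int.floordiv (n - 1) 8).toNat =
          ((PySem.Int.floordiv (n - 1) 8 - 1).toNat) + 1 := by omega
      rw [hrep, List.replicate_succ]
      simp
      ring
  · rename_i h8
    rfl
termination_by n.toNat
decreasing_by omega

theorem make_eq_append (n : Int) (array : List (List Int)) :
    make_select_tree_array n array = array ++ pvChunks n := by
  rw [make_select_tree_array, pvChunks, pvBuildM_eq_chunk]
  by_cases h : (pvChunk n).length = 1
  · simp [h]
  · have hlen := pvChunk_len_pos n
    have h8 : n > 8 := by
      by_contra hc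
      exact h (pvChunk_len_one n hc)
    have hlt := pvChunk_len_lt n (by omega)
    have ih := make_eq_append ((pvChunk n).length : Int) (array ++ [pvChunk n])
    rw [if_neg h, if_neg h, ih]
    simp
termination_by n.toNat
decreasing_by omega

-- ===== VERDICT (by name: the statement is the Claim_ definition above) =====
theorem make_select_tree_array_spec : Claim_equal_make_select_tree_array := by
  intro n array _
  unfold Spec_make_select_tree_array make_select_tree_array_alt
  exact make_eq_append n array
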